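-- pv_equiv track=rewrite | github.com/Chofito/MaratonPy | solutions.py | prob_17
-- ===== SOURCE A (Python) =====
-- def prob_17(a, b):
--     divs_a = []
--     for i in range(2, a):
--         if a % i == 0:
--             divs_a.append(i)
--
--     for i in range(2, b):
--         if b % i == 0 and i in divs_a:
--             return False
--
--     return True
-- ===== SOURCE B (Python) =====
-- def prob_17(a, b):
--     # Reduce to a single gcd: a common divisor of a and b is exactly a divisor of gcd(a, b).
--     x, y = abs(a), abs(b)
--     while y:
--         x, y = y, x % y
--     g = x
--     d = 2
--     while d < a and d < b:
--         if g % d == 0: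
--             return False
--         d += 1
--     return True
-- ===== Notes on version B (the rewrite author's own statement) =====
-- stated objective: faster
-- what changed: B computes gcd(a,b) by Euclid's algorithm once and scans d in [2, min(a,b)) for a divisor of the gcd, replacing A's explicitly built divisor list of a (a full scan of range(2,a) and range(2,b) with list membership tests).
import Mathlib
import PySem

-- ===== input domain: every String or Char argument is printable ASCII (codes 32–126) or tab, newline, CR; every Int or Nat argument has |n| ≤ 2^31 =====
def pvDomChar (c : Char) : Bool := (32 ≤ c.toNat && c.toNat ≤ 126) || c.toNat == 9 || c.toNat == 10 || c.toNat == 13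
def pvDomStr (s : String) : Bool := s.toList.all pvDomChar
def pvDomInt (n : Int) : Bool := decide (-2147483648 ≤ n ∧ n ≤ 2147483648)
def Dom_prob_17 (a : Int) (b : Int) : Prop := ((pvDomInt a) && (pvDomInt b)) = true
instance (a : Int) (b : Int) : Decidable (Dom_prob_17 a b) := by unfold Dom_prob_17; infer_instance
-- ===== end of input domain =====

-- B replaces A's divisor-list-plus-membership scan by one Euclid gcd followed by a single scan for a divisor of the gcd (alternative algorithm, return value identical).

-- ===== PORT A =====
def prob_17 (a : Int) (b : Int) : Bool :=
  let divs_a := (PySem.List.pyRange 2 a 1).foldl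
    (fun acc i => if PySem.Int.mod a i = 0 then acc ++ [i] else acc) []
  if (PySem.List.pyRange 2 b 1).any
      (fun i => PySem.Int.mod b i == 0 && decide (i ∈ divs_a)) then false
  else true

-- ===== PORT B =====
-- hand-written Euclid loop of Source B: while y: x, y = y, x % y  (on abs values, so Nat)
def pvEuclid : Nat → Nat → Nat
  | x, 0 => x
  | x, (k+1) => pvEuclid (k+1) (x % (k+1))
decreasing_by exact Nat.mod_lt _ (Nat.succ_pos k)

-- Source B's scan: while d < a and d < b: if g % d == 0: return False; d += 1
def pvScan (g : Nat) (d : Int) : Nat → Bool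
  | 0 => true
  | (n+1) => if PySem.Int.mod (g : Int) d = 0 then false else pvScan g (d+1) n

def prob_17_alt (a : Int) (b : Int) : Bool :=
  let g := pvEuclid a.natAbs b.natAbs
  pvScan g 2 ((min a b) - 2).toNat

-- ===== PRECONDITION & SPEC =====
def Spec_prob_17 (a : Int) (b : Int) (out : Bool) : Prop := out = prob_17_alt a b
instance (a : Int) (b : Int) (out : Bool) : Decidable (Spec_prob_17 a b out) := by unfold Spec_prob_17; infer_instance

-- ===== CLAIM (what is proved, stated in full; the proofs are below) =====
def Claim_equal_prob_17 : Prop := ∀ (a : Int) (b : Int), Dom_prob_17 a b → Spec_prob_17 a b (prob_17 a b)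

-- ===== LEMMAS AND PROOFS =====

theorem pvEuclid_eq_gcd (x y : Nat) : pvEuclid x y = Nat.gcd y x := by
  fun_induction pvEuclid x y with
  | case1 x => simp
  | case2 x k ih => rw [ih]; exact (Nat.gcd_succ k x).symm

theorem pvScan_false_iff (g : Nat) (d : Int) (n : Nat) :
    pvScan g d n = false ↔ ∃ e : Int, d ≤ e ∧ e < d + n ∧ e ∣ (g : Int) := by
  induction n generalizing d with
  | zero =>
    simp only [pvScan]
    constructor
    · intro h; exact absurd h (by simp)
    · rintro ⟨e, h1, h2, _⟩; omega
  | succ n ih =>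
    simp only [pvScan]
    split_ifs with hd
    · simp only [true_iff]
      exact ⟨d, le_refl d, by omega, (PySem.Int.mod_eq_zero_iff_dvd _ _).1 hd⟩
    · rw [ih]
      constructor
      · rintro ⟨e, h1, h2, h3⟩; exact ⟨e, by omega, by omega, h3⟩
      · rintro ⟨e, h1, h2, h3⟩
        refine ⟨e, ?_, by omega, h3⟩
        rcases eq_or_lt_of_le h1 with rfl | h
        · exact absurd ((PySem.Int.mod_eq_zero_iff_dvd _ _).2 h3) hd
        · omega

theorem pv_dvd_gcd_iff (a b e : Int) : e ∣ ((Int.gcd b a : Nat) : Int) ↔ e ∣ a ∧ e ∣ b := by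
  constructor
  · intro h
    exact ⟨h.trans (Int.gcd_dvd_right b a), h.trans (Int.gcd_dvd_left b a)⟩
  · rintro ⟨h1, h2⟩
    have hn : e.natAbs ∣ Int.gcd b a :=
      Int.dvd_gcd (Int.natAbs_dvd.2 h2) (Int.natAbs_dvd.2 h1)
    exact Int.natAbs_dvd.1 (Int.natCast_dvd_natCast.2 hn)

theorem prob_17_false_iff (a b : Int) :
    prob_17 a b = false ↔ ∃ e : Int, 2 ≤ e ∧ e < a ∧ e < b ∧ e ∣ a ∧ e ∣ b := by
  unfold prob_17
  simp only [PySem.List.foldl_append_ite_eq_filter, List.nil_append]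
  constructor
  · intro h
    split_ifs at h with hx
    rw [List.any_eq_true] at hx
    obtain ⟨i, hi, hp⟩ := hx
    simp only [Bool.and_eq_true, beq_iff_eq, decide_eq_true_eq, List.mem_filter,
      PySem.List.mem_pyRange_one] at hi hp
    obtain ⟨hbd, ⟨hia, hia2⟩, had⟩ := hp
    refine ⟨i, by omega, by omega, by omega, ?_, ?_⟩
    · exact (PySem.Int.mod_eq_zero_iff_dvd _ _).1 had
    · exact (PySem.Int.mod_eq_zero_iff_dvd _ _).1 hbd
  · rintro ⟨e, h1, h2, h3, h4, h5⟩
    have hany : ((PySem.List.pyRange 2 b 1).any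
        (fun i => PySem.Int.mod b i == 0 &&
          decide (i ∈ (PySem.List.pyRange 2 a 1).filter (fun i => decide (PySem.Int.mod a i = 0))))) = true := by
      rw [List.any_eq_true]
      refine ⟨e, ?_, ?_⟩
      · rw [PySem.List.mem_pyRange_one]; omega
      · simp only [Bool.and_eq_true, beq_iff_eq, decide_eq_true_eq, List.mem_filter,
          PySem.List.mem_pyRange_one]
        exact ⟨(PySem.Int.mod_eq_zero_iff_dvd _ _).2 h5,
          ⟨⟨by omega, by omega⟩, (PySem.Int.mod_eq_zero_iff_dvd _ _).2 h4⟩⟩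
    rw [if_pos hany]

theorem prob_17_alt_false_iff (a b : Int) :
    prob_17_alt a b = false ↔ ∃ e : Int, 2 ≤ e ∧ e < a ∧ e < b ∧ e ∣ a ∧ e ∣ b := by
  unfold prob_17_alt
  rw [pvScan_false_iff, pvEuclid_eq_gcd]
  constructor
  · rintro ⟨e, h1, h2, h3⟩
    have := (pv_dvd_gcd_iff a b e).1 (by exact_mod_cast h3)
    exact ⟨e, h1, by omega, by omega, this.1, this.2⟩
  · rintro ⟨e, h1, h2, h3, h4, h5⟩
    exact ⟨e, h1, by omega, by exact_mod_cast (pv_dvd_gcd_iff a b e).2 ⟨h4, h5⟩⟩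

-- ===== VERDICT (by name: the statement is the Claim_ definition above) =====
theorem prob_17_spec : Claim_equal_prob_17 := by
  intro a b _
  unfold Spec_prob_17
  have h := (prob_17_false_iff a b).trans (prob_17_alt_false_iff a b).symm
  cases ha : prob_17 a b <;> cases hb : prob_17_alt a b <;> simp_all
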